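-- pv_equiv track=rewrite | github.com/kliegeois/clad | kokkos/postProcess.py | getVariableDeclLineID
-- ===== SOURCE A (Python) =====
-- def getVariableDeclLineID(linesIn, variableName, index0, index1):
--     for index in range(index0, index1):
--         if linesIn[index].find('=') == -1 and linesIn[index].find(' ' + variableName + ';') != -1:
--             return index
--     for index in range(index0, index1):
--         if linesIn[index].find(' ' + variableName + ' =') != -1:
--             return index
--     return 0
-- ===== SOURCE B (Python) =====
-- def getVariableDeclLineID(linesIn, variableName, index0, index1):
--     assign = None
--     for index in range(index0, index1):
--         line = linesIn[index]
--         if line.find('=') == -1 and line.find(' ' + variableName + ';') != -1: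
--             return index
--         if assign is None and line.find(' ' + variableName + ' =') != -1:
--             assign = index
--     return assign if assign is not None else 0
-- ===== Notes on version B (the rewrite author's own statement) =====
-- stated objective: alternative
-- what changed: A makes two sequential scans of the index range (first for a bare declaration, then for an assignment); B makes a single pass that returns a declaration immediately and defers the first assignment index in an accumulator, returning it (or 0) after the loop.
import Mathlib
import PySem

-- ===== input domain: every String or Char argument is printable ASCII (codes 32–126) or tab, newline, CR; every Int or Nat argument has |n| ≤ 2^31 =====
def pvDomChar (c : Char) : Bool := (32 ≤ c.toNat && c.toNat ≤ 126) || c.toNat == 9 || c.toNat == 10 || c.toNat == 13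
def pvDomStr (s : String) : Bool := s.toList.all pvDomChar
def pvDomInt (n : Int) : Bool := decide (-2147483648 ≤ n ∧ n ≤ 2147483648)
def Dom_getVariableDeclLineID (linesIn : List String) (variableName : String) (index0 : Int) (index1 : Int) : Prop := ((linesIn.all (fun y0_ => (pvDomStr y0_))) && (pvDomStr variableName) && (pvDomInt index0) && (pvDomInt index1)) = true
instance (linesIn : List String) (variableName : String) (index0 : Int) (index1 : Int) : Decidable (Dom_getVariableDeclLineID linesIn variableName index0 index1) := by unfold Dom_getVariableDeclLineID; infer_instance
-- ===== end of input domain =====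

-- B folds A's two sequential scans into ONE pass: declarations return immediately, the first
-- assignment index is deferred in an accumulator (objective: alternative decomposition, same cost).

-- ===== PORT A =====
-- line.find('=') == -1 and line.find(' ' + name + ';') != -1
def pvDecl (line : String) (name : String) : Bool :=
  PySem.Str.find line "=" == -1 && PySem.Str.find line (" " ++ name ++ ";") != -1

-- line.find(' ' + name + ' =') != -1
def pvAssign (line : String) (name : String) : Bool :=
  PySem.Str.find line (" " ++ name ++ " =") != -1

-- A's first loop; pyGetD with default "" stands for linesIn[index] (IndexError is excluded by Pre_)
def pvLoop1 (lines : List String) (name : String) : List Int → Option Int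
  | [] => none
  | i :: rest =>
    if pvDecl (PySem.List.pyGetD lines i "") name then some i else pvLoop1 lines name rest

-- A's second loop
def pvLoop2 (lines : List String) (name : String) : List Int → Option Int
  | [] => none
  | i :: rest =>
    if pvAssign (PySem.List.pyGetD lines i "") name then some i else pvLoop2 lines name rest

def getVariableDeclLineID (linesIn : List String) (variableName : String) (index0 : Int) (index1 : Int) : Int :=
  let idxs := PySem.List.pyRange index0 index1 1
  match pvLoop1 linesIn variableName idxs with
  | some i => i
  | none =>
    match pvLoop2 linesIn variableName idxs with
    | some i => i
    | none => 0

-- ===== PORT B =====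
-- single pass: early return on a declaration, first assignment index deferred in `assign`
def pvScan (lines : List String) (name : String) : List Int → Option Int → Int
  | [], assign => assign.getD 0
  | i :: rest, assign =>
    let line := PySem.List.pyGetD lines i ""
    if pvDecl line name then i
    else pvScan lines name rest (if assign.isNone && pvAssign line name then some i else assign)

def getVariableDeclLineID_alt (linesIn : List String) (variableName : String) (index0 : Int) (index1 : Int) : Int :=
  pvScan linesIn variableName (PySem.List.pyRange index0 index1 1) none

-- ===== PRECONDITION & SPEC =====
-- Pre_ excludes EXACTLY the inputs on which Python A raises IndexError: those where the
-- walked range leaves linesIn's valid index span (-len ≤ i < len, Python wraparound) before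
-- any declaration line has been found. It admits every input on which A returns, including
-- those where a declaration hit precedes a later out-of-range index (third disjunct: some
-- visited valid position carries a declaration). B raises on exactly the same inputs.
def Pre_getVariableDeclLineID (linesIn : List String) (variableName : String) (index0 : Int) (index1 : Int) : Prop :=
  index1 ≤ index0 ∨
    (-(linesIn.length : Int) ≤ index0 ∧
      (index1 ≤ (linesIn.length : Int) ∨
        ∃ pos ∈ List.range linesIn.length,
          (index0 ≤ (pos : Int) ∨ index0 < 0) ∧
            pvDecl (linesIn.getD pos "") variableName = true))
instance (linesIn : List String) (variableName : String) (index0 : Int) (index1 : Int) : Decidable (Pre_getVariableDeclLineID linesIn variableName index0 index1) := by unfold Pre_getVariableDeclLineID; infer_instance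

def pvWitness_getVariableDeclLineID : List String × String × Int × Int := (["int a;", " a = 3;"], "a", 0, 2)

def Spec_getVariableDeclLineID (linesIn : List String) (variableName : String) (index0 : Int) (index1 : Int) (out : Int) : Prop := out = getVariableDeclLineID_alt linesIn variableName index0 index1
instance (linesIn : List String) (variableName : String) (index0 : Int) (index1 : Int) (out : Int) : Decidable (Spec_getVariableDeclLineID linesIn variableName index0 index1 out) := by unfold Spec_getVariableDeclLineID; infer_instance

-- ===== CLAIM (what is proved, stated in full; the proofs are below) =====
def Claim_equal_getVariableDeclLineID : Prop := ∀ (linesIn : List String) (variableName : String) (index0 : Int) (index1 : Int), Dom_getVariableDeclLineID linesIn variableName index0 index1 → Pre_getVariableDeclLineID linesIn variableName index0 index1 → Spec_getVariableDeclLineID linesIn variableName index0 index1 (getVariableDeclLineID linesIn variableName index0 index1)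

-- ===== LEMMAS AND PROOFS =====

-- the single pass equals: first-loop hit, else the carried assign, else the second-loop hit, else 0
theorem pvScan_eq (lines : List String) (name : String) :
    ∀ (idxs : List Int) (assign : Option Int),
      pvScan lines name idxs assign =
        match pvLoop1 lines name idxs with
        | some i => i
        | none =>
          match assign with
          | some a => a
          | none =>
            match pvLoop2 lines name idxs with
            | some i => i
            | none => 0 := by
  intro idxs
  induction idxs with
  | nil => intro assign; cases assign <;> simp [pvScan, pvLoop1, pvLoop2]
  | cons i rest ih =>
    intro assign
    simp only [pvScan, pvLoop1, pvLoop2]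
    by_cases hd : pvDecl (PySem.List.pyGetD lines i "") name
    · simp [hd]
    · cases assign with
      | some a => simp [hd, ih]
      | none =>
        by_cases ha : pvAssign (PySem.List.pyGetD lines i "") name
        · simp [hd, ha, ih]
        · simp [hd, ha, ih]

theorem pvWitness_ok : Dom_getVariableDeclLineID pvWitness_getVariableDeclLineID.1 pvWitness_getVariableDeclLineID.2.1 pvWitness_getVariableDeclLineID.2.2.1 pvWitness_getVariableDeclLineID.2.2.2 ∧ Pre_getVariableDeclLineID pvWitness_getVariableDeclLineID.1 pvWitness_getVariableDeclLineID.2.1 pvWitness_getVariableDeclLineID.2.2.1 pvWitness_getVariableDeclLineID.2.2.2 := by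
  decide

-- ===== VERDICT (by name: the statement is the Claim_ definition above) =====
theorem getVariableDeclLineID_spec : Claim_equal_getVariableDeclLineID := by
  intro linesIn variableName index0 index1 _ _
  unfold Spec_getVariableDeclLineID getVariableDeclLineID getVariableDeclLineID_alt
  rw [pvScan_eq]
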